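-- pv_equiv track=rewrite | github.com/zena-hira/aoc_2022 | solutions/aoc_25.py | parse
-- ===== SOURCE A (Python) =====
-- def parse(line):
--     s = 0
--     for x in line.strip():
--         s *= 5
--
--         if x == '2':
--             s += 2
--         if x == '1':
--             s += 1
--         if x == '0':
--             pass
--         if x == '-':
--             s -= 1
--         if x == '=':
--             s -= 2
--     return s
-- ===== SOURCE B (Python) =====
-- def parse(line):
--     val = {'2': 2, '1': 1, '0': 0, '-': -1, '=': -2}
--     s, p = 0, 1
--     for c in reversed(line.strip()):
--         s += val.get(c, 0) * p
--         p *= 5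
--     return s
-- ===== Notes on version B (the rewrite author's own statement) =====
-- stated objective: alternative
-- what changed: Replaces Horner's left-to-right multiply-add with an if-chain by a right-to-left pass over the reversed string that maintains an explicit place weight (power of 5) and adds digit*weight looked up in a value map.
import Mathlib
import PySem

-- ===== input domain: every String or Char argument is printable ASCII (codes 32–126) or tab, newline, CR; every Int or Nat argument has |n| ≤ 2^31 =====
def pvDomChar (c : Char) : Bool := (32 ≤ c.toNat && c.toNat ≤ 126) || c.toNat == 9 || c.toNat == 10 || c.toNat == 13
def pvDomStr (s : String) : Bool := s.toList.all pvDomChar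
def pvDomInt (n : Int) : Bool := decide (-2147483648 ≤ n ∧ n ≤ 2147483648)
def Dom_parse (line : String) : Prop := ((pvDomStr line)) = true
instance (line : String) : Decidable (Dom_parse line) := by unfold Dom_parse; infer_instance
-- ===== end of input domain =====

-- B replaces A's Horner multiply-add if-chain by a reversed pass with an explicit power-of-5 place weight and a digit-value map (alternative decomposition, same cost).

-- ===== PORT A =====
def parse (line : String) : Int :=
  (PySem.Str.strip line).toList.foldl
    (fun s x =>
      let s := s * 5
      let s := if x = '2' then s + 2 else s
      let s := if x = '1' then s + 1 else s
      let s := if x = '-' then s - 1 else s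
      let s := if x = '=' then s - 2 else s
      s) 0

-- ===== PORT B =====
def snafuVal : PySem.Dict Char Int :=
  PySem.Dict.ofList [('2', 2), ('1', 1), ('0', 0), ('-', -1), ('=', -2)]

def parse_alt (line : String) : Int :=
  ((PySem.Str.strip line).toList.reverse.foldl
    (fun (sp : Int × Int) c => (sp.1 + (snafuVal.getD c 0) * sp.2, sp.2 * 5))
    (0, 1)).1

-- ===== PRECONDITION & SPEC =====
def Spec_parse (line : String) (out : Int) : Prop := out = parse_alt line
instance (line : String) (out : Int) : Decidable (Spec_parse line out) := by unfold Spec_parse; infer_instance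

-- ===== CLAIM (what is proved, stated in full; the proofs are below) =====
def Claim_equal_parse : Prop := ∀ (line : String), Dom_parse line → Spec_parse line (parse line)

-- ===== LEMMAS AND PROOFS =====

-- little-endian SNAFU value of a char list (head is the units digit)
def snafuLE : List Char → Int
  | [] => 0
  | c :: t => snafuVal.getD c 0 + 5 * snafuLE t

lemma snafuVal_getD (x : Char) : snafuVal.getD x 0 =
    if x = '2' then 2 else if x = '1' then 1 else if x = '0' then 0
    else if x = '-' then -1 else if x = '=' then -2 else 0 := by
  by_cases h2 : x = '2'
  · subst h2; rfl
  by_cases h1 : x = '1'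
  · subst h1; rfl
  by_cases h0 : x = '0'
  · subst h0; rfl
  by_cases hm : x = '-'
  · subst hm; rfl
  by_cases he : x = '='
  · subst he; rfl
  simp only [h2, h1, h0, hm, he, if_false]
  simp only [snafuVal, PySem.Dict.getD, PySem.Dict.get?, PySem.Dict.ofList, PySem.Dict.empty,
    PySem.Dict.update, PySem.Dict.insert]
  simp [beq_eq_false_iff_ne.mpr (Ne.symm h2), beq_eq_false_iff_ne.mpr (Ne.symm h1),
    beq_eq_false_iff_ne.mpr (Ne.symm h0), beq_eq_false_iff_ne.mpr (Ne.symm hm),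
    beq_eq_false_iff_ne.mpr (Ne.symm he)]

lemma stepA_eq (s : Int) (x : Char) :
    (let s' := s * 5
     let s' := if x = '2' then s' + 2 else s'
     let s' := if x = '1' then s' + 1 else s'
     let s' := if x = '-' then s' - 1 else s'
     let s' := if x = '=' then s' - 2 else s'
     s') = s * 5 + snafuVal.getD x 0 := by
  rw [snafuVal_getD]
  by_cases h2 : x = '2' <;> by_cases h1 : x = '1' <;> by_cases h0 : x = '0' <;>
    by_cases hm : x = '-' <;> by_cases he : x = '=' <;>
    simp_all <;> ring

lemma foldB_eq (l : List Char) (s p : Int) :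
    l.foldl (fun (sp : Int × Int) c => (sp.1 + (snafuVal.getD c 0) * sp.2, sp.2 * 5)) (s, p)
      = (s + p * snafuLE l, p * 5 ^ l.length) := by
  induction l generalizing s p with
  | nil => simp [snafuLE]
  | cons c t ih =>
      simp only [List.foldl_cons, ih, snafuLE, List.length_cons]
      simp only [Prod.mk.injEq]
      constructor <;> ring

lemma foldA_eq (l : List Char) :
    l.foldl
      (fun s x =>
        let s := s * 5
        let s := if x = '2' then s + 2 else s
        let s := if x = '1' then s + 1 else s
        let s := if x = '-' then s - 1 else s
        let s := if x = '=' then s - 2 else s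
        s) 0 = snafuLE l.reverse := by
  induction l using List.reverseRecOn with
  | nil => simp [snafuLE]
  | append_singleton t c ih =>
      rw [List.foldl_append, List.foldl_cons, List.foldl_nil, stepA_eq, ih]
      simp [snafuLE]
      ring

-- ===== VERDICT (by name: the statement is the Claim_ definition above) =====
theorem parse_spec : Claim_equal_parse := by
  intro line _
  unfold Spec_parse parse parse_alt
  rw [foldA_eq, foldB_eq]
  ring
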